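-- pv_equiv track=rewrite | github.com/parth134/YTViewSage | adview yt prediction.py | checki
-- ===== SOURCE A (Python) =====
-- def checki(x):
--     y=x[2:]
--     h=''
--     m=''
--     s=''
--     mm=''
--     P=['H','M','S']
--     for i in y:
--         if i not in P:
--             mm+=i
--         else:
--             if(i=="H"):
--                 h=mm
--                 mm=''
--             elif(i=="M"):
--                 m=mm
--                 mm=''
--             else:
--                 s=mm
--                 mm=''
--     if(h==''):
--         h='00'
--     if(m==''):
--         m='00'
--     if(s==''):
--         s='00'
--     bp=h+':'+m+':'+s
--     return bp
-- ===== SOURCE B (Python) =====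
-- def checki(x):
--     # Split the duration body into (segment, unit) pieces at each H/M/S marker
--     # and dispatch into a dict (later units overwrite earlier ones), instead of
--     # A's char-by-char buffer state machine.
--     def split_first(y):
--         for j, c in enumerate(y):
--             if c in 'HMS':
--                 return y[:j], c, y[j + 1:]
--         return None
--     res = {}
--     y = x[2:]
--     while True:
--         f = split_first(y)
--         if f is None:
--             break
--         pre, u, y = f
--         res[u] = pre
--     return ':'.join(res.get(u) or '00' for u in 'HMS')
-- ===== Notes on version B (the rewrite author's own statement) =====
-- stated objective: alternative
-- what changed: Replaces A's char-by-char buffer state machine (four string accumulators mutated per character) with a split-at-first-marker decomposition: the body is repeatedly split into (segment, unit, rest) at the first H/M/S marker and the segments are dispatched into a dict (later units overwrite), then H, M and S are looked up with a double-zero default and joined.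
import Mathlib
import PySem

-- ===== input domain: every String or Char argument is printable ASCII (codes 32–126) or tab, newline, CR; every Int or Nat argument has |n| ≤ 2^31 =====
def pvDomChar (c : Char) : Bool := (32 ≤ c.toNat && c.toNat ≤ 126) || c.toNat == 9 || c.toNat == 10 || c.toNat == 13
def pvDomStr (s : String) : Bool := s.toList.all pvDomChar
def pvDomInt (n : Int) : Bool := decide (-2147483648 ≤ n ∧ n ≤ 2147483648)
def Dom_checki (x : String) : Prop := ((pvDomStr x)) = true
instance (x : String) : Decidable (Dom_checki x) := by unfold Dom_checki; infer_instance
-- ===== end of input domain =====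

-- B replaces A's per-character buffer state machine with a split-at-marker + dict-dispatch decomposition (alternative structure, same cost).

-- ===== PORT A =====
-- the loop body of A: state (h, m, s, mm), one character i
def checkiStep : List Char × List Char × List Char × List Char → Char → List Char × List Char × List Char × List Char
  | (h, m, s, mm), i =>
    if i ∉ ['H', 'M', 'S'] then (h, m, s, mm ++ [i])
    else if i = 'H' then (mm, m, s, [])
    else if i = 'M' then (h, mm, s, [])
    else (h, m, mm, [])

-- "if h == '': h = '00'"
def checkiDef00 (v : List Char) : List Char := if v = [] then ['0', '0'] else v

def checki (x : String) : String :=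
  let y := PySem.List.slice x.toList (some 2) none   -- y = x[2:]
  let st := y.foldl checkiStep ([], [], [], [])
  String.ofList (checkiDef00 st.1 ++ ':' :: checkiDef00 st.2.1 ++ ':' :: checkiDef00 st.2.2.1)

-- ===== PORT B =====
-- split_first(y): (y[:j], y[j], y[j+1:]) at the first H/M/S marker, else None
def splitFirst : List Char → Option (List Char × Char × List Char)
  | [] => none
  | c :: t =>
    if c = 'H' ∨ c = 'M' ∨ c = 'S' then some ([], c, t)
    else
      match splitFirst t with
      | none => none
      | some (p, u, r) => some (c :: p, u, r)

theorem splitFirst_rest_lt {y p u r} (h : splitFirst y = some (p, u, r)) :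
    r.length < y.length := by
  induction y generalizing p u r with
  | nil => simp [splitFirst] at h
  | cons c t ih =>
    simp only [splitFirst] at h
    split at h
    · simp only [Option.some.injEq, Prod.mk.injEq] at h
      obtain ⟨-, -, hr⟩ := h
      subst hr
      simp
    · cases ht : splitFirst t with
      | none => rw [ht] at h; simp at h
      | some q =>
        obtain ⟨p', u', r'⟩ := q
        rw [ht] at h
        simp at h
        obtain ⟨_, hu, hr⟩ := h
        subst hu hr
        have := ih ht
        simp
        omega

-- the while-loop of B: repeatedly split at the first marker, dict-assign the segment
def checkiGo (y : List Char) (res : PySem.Dict Char (List Char)) : PySem.Dict Char (List Char) :=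
  match h : splitFirst y with
  | none => res
  | some (p, u, r) => checkiGo r (res.insert u p)
termination_by y.length
decreasing_by exact splitFirst_rest_lt h

-- "res.get(u) or '00'"
def checkiOr00 (o : Option (List Char)) : List Char :=
  match o with
  | none => ['0', '0']
  | some v => if v = [] then ['0', '0'] else v

def checki_alt (x : String) : String :=
  let y := PySem.List.slice x.toList (some 2) none   -- y = x[2:]
  let res := checkiGo y PySem.Dict.empty
  String.ofList (checkiOr00 (res.get? 'H') ++ ':' :: checkiOr00 (res.get? 'M') ++ ':' :: checkiOr00 (res.get? 'S'))

-- ===== PRECONDITION & SPEC =====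
def Spec_checki (x : String) (out : String) : Prop := out = checki_alt x
instance (x : String) (out : String) : Decidable (Spec_checki x out) := by unfold Spec_checki; infer_instance

-- ===== CLAIM (what is proved, stated in full; the proofs are below) =====
def Claim_equal_checki : Prop := ∀ (x : String), Dom_checki x → Spec_checki x (checki x)

-- ===== LEMMAS AND PROOFS =====

theorem splitFirst_marker {y p u r} (h : splitFirst y = some (p, u, r)) :
    u = 'H' ∨ u = 'M' ∨ u = 'S' := by
  induction y generalizing p u r with
  | nil => simp [splitFirst] at h
  | cons c t ih =>
    simp only [splitFirst] at h
    split at h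
    · simp_all
    · cases ht : splitFirst t with
      | none => rw [ht] at h; simp at h
      | some q =>
        obtain ⟨p', u', r'⟩ := q
        rw [ht] at h
        simp at h
        obtain ⟨_, hu, _⟩ := h
        subst hu
        exact ih ht

-- A's fold over a marker-free tail just extends mm
theorem foldA_none {y : List Char} (h : splitFirst y = none) (hs ms ss mm : List Char) :
    y.foldl checkiStep (hs, ms, ss, mm) = (hs, ms, ss, mm ++ y) := by
  induction y generalizing mm with
  | nil => simp
  | cons c t ih =>
    simp only [splitFirst] at h
    split at h
    · simp at h
    · cases ht : splitFirst t with
      | none =>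
        rename_i hc
        simp only [List.foldl_cons, checkiStep]
        rw [if_pos (by simp; tauto)]
        rw [ih ht]
        simp
      | some q => obtain ⟨p', u', r'⟩ := q; rw [ht] at h; simp at h

-- what A's assignment at marker u does to the state
def assignA (u : Char) (v : List Char) (st : List Char × List Char × List Char) :
    List Char × List Char × List Char × List Char :=
  if u = 'H' then (v, st.2.1, st.2.2, [])
  else if u = 'M' then (st.1, v, st.2.2, [])
  else (st.1, st.2.1, v, [])

-- A's fold across the first split
theorem foldA_split {y : List Char} {p : List Char} {u : Char} {r : List Char}
    (h : splitFirst y = some (p, u, r)) (hs ms ss mm : List Char) :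
    y.foldl checkiStep (hs, ms, ss, mm) =
      r.foldl checkiStep (assignA u (mm ++ p) (hs, ms, ss)) := by
  induction y generalizing p u r mm with
  | nil => simp [splitFirst] at h
  | cons c t ih =>
    simp only [splitFirst] at h
    split at h
    · rename_i hc
      simp at h
      obtain ⟨hp, hu, hr⟩ := h
      subst hp hu hr
      simp only [List.foldl_cons, checkiStep]
      rw [if_neg (by simp; tauto)]
      rcases hc with hc | hc | hc <;> subst hc <;> simp [assignA]
    · rename_i hc
      cases ht : splitFirst t with
      | none => rw [ht] at h; simp at h
      | some q =>
        obtain ⟨p', u', r'⟩ := q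
        rw [ht] at h
        simp at h
        obtain ⟨hp, hu, hr⟩ := h
        subst hp hu hr
        simp only [List.foldl_cons, checkiStep]
        rw [if_pos (by simp; tauto)]
        rw [ih ht]
        simp

-- main invariant: B's dict lookups track the first three components of A's fold
theorem go_tracks_fold (y : List Char) (res : PySem.Dict Char (List Char)) :
    (((checkiGo y res).get? 'H').getD [], ((checkiGo y res).get? 'M').getD [],
      ((checkiGo y res).get? 'S').getD [])
    = (fun st : List Char × List Char × List Char × List Char => (st.1, st.2.1, st.2.2.1))
        (y.foldl checkiStep
          ((res.get? 'H').getD [], (res.get? 'M').getD [], (res.get? 'S').getD [], [])) := by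
  fun_induction checkiGo y res with
  | case1 y res h =>
    rw [foldA_none h]
  | case2 y res p u r h ih =>
    rw [foldA_split h]
    simp only [List.nil_append]
    rw [ih]
    rcases splitFirst_marker h with hu | hu | hu <;> subst hu <;>
      simp [assignA, PySem.Dict.get?_insert_self,
        PySem.Dict.get?_insert_of_ne _ _ (by decide : ('M' : Char) ≠ 'H'),
        PySem.Dict.get?_insert_of_ne _ _ (by decide : ('S' : Char) ≠ 'H'),
        PySem.Dict.get?_insert_of_ne _ _ (by decide : ('H' : Char) ≠ 'M'),
        PySem.Dict.get?_insert_of_ne _ _ (by decide : ('S' : Char) ≠ 'M'),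
        PySem.Dict.get?_insert_of_ne _ _ (by decide : ('H' : Char) ≠ 'S'),
        PySem.Dict.get?_insert_of_ne _ _ (by decide : ('M' : Char) ≠ 'S')]

theorem or00_eq_def00 (o : Option (List Char)) :
    checkiOr00 o = checkiDef00 (o.getD []) := by
  cases o with
  | none => simp [checkiOr00, checkiDef00]
  | some v => simp [checkiOr00, checkiDef00]

theorem checki_eq (x : String) : checki x = checki_alt x := by
  unfold checki checki_alt
  simp only [or00_eq_def00]
  have := go_tracks_fold (PySem.List.slice x.toList (some 2) none) PySem.Dict.empty
  simp only [PySem.Dict.get?_empty, Option.getD_none] at this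
  have h1 := congrArg (·.1) this
  have h2 := congrArg (·.2.1) this
  have h3 := congrArg (·.2.2) this
  simp only at h1 h2 h3
  rw [h1, h2, h3]

-- ===== VERDICT (by name: the statement is the Claim_ definition above) =====
theorem checki_spec : Claim_equal_checki := by
  intro x _
  unfold Spec_checki
  exact checki_eq x
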